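-- pv_equiv track=rewrite | github.com/nikhilkalige/code-refinery | euler/116/solution.py | solve
-- ===== SOURCE A (Python) =====
-- def solve(N: int, red: int, green: int, blue: int) -> int:
--     """
--     Calculate the number of ways N blocks can be tiled with one of the choices.
--     """
--
--     def tile(block_size: int) -> int:
--         dp = [0] * (N + 1)
--         dp[0] = 1
--
--         for n in range(1, N + 1):
--             # 1. Starts with a gray
--             dp[n] += dp[n - 1]
--
--             if n >= block_size:
--                 dp[n] += dp[n - (block_size)]
--
--         # If we ignore the term 2, it would mean we could all the tiles
--         # being gray. This is a invalid case and we need to subtract it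
--         return dp[N] - 1
--
--     return tile(red) + tile(green) + tile(blue)
-- ===== SOURCE B (Python) =====
-- def solve(N: int, red: int, green: int, blue: int) -> int:
--     """
--     Calculate the number of ways N blocks can be tiled with one of the choices.
--     """
--     if N < 0:
--         raise ValueError("cannot tile a negative number of blocks")
--
--     def comb(n: int, k: int) -> int:
--         c = 1
--         for i in range(k):
--             c = c * (n - i) // (i + 1)
--         return c
--
--     def tile(block_size: int) -> int:
--         if block_size < 1:
--             # no tile of nonpositive length can ever be placed
--             return 0
--         # sum over the number k of colored tiles used (at least one)
--         total = 0
--         for k in range(1, N // block_size + 1):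
--             total += comb(N - k * (block_size - 1), k)
--         return total
--
--     return tile(red) + tile(green) + tile(blue)
-- ===== Notes on version B (the rewrite author's own statement) =====
-- stated objective: alternative
-- what changed: Replaces each length-indexed dp array with a direct combinatorial sum over the number k of colored tiles, tile(m) = sum over k with k*m <= N of C(N - k*(m-1), k), computed with a multiplicative binomial-coefficient helper; no dp table is built.
-- intended difference: For N >= 1 with a tile size equal to 0, A's in-place dp update double-counts and returns 2^N - 1 arrangements for that color although no tile of length 0 can ever be placed; B counts 0 ways for such a color, the intended value. — e.g. on solve(1, 0, 1, 1): A returns 3, B returns 2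
import Mathlib
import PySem

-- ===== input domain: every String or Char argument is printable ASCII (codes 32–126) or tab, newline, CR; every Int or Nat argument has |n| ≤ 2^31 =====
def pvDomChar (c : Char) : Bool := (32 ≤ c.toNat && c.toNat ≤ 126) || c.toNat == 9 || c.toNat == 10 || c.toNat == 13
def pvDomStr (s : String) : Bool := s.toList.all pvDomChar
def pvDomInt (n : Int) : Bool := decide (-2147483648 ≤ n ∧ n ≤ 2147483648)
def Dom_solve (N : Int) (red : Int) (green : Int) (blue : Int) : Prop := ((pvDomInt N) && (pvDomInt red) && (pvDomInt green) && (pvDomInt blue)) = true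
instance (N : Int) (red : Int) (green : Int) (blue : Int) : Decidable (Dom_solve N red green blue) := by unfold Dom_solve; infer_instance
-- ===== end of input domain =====

-- B replaces A's dp arrays by a direct binomial sum over the number of colored tiles (alternative decomposition, same return values on Pre_).
-- B replaces the dp arrays by a direct binomial sum over the number of colored tiles (alternative decomposition, same return values on Pre_).


-- ===== PORT A =====
-- loop body of tile(): dp[n] += dp[n-1]; if n >= block_size: dp[n] += dp[n-block_size]
def bodyA (block_size : Int) (dp : List Int) (n : Int) : List Int :=
  let dp := PySem.List.pySetD dp n (PySem.List.pyGetD dp n 0 + PySem.List.pyGetD dp (n - 1) 0)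
  if n ≥ block_size then
    PySem.List.pySetD dp n (PySem.List.pyGetD dp n 0 + PySem.List.pyGetD dp (n - block_size) 0)
  else dp

-- tile(block_size) from A; outside Pre_ the Python raises IndexError, the total
-- forms pySetD/pyGetD are relied on only inside Pre_ (all indices in range there).
def tileA (N : Int) (block_size : Int) : Int :=
  let dp : List Int := PySem.List.pyRepeat [0] (N + 1)
  let dp := PySem.List.pySetD dp 0 1
  let dp := (PySem.List.pyRange 1 (N + 1) 1).foldl (bodyA block_size) dp
  PySem.List.pyGetD dp N 0 - 1

def solve (N : Int) (red : Int) (green : Int) (blue : Int) : Int :=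
  tileA N red + tileA N green + tileA N blue

-- ===== PORT B =====
-- comb(n, k) from Source B: multiplicative binomial coefficient.
def combB (n : Int) (k : Int) : Int :=
  (PySem.List.pyRange 0 k 1).foldl (fun c i => PySem.Int.floordiv (c * (n - i)) (i + 1)) 1

-- tile(block_size) from Source B: sum over the number k of colored tiles.
def tileB (N : Int) (block_size : Int) : Int :=
  if block_size < 1 then 0
  else
    (PySem.List.pyRange 1 (PySem.Int.floordiv N block_size + 1) 1).foldl
      (fun total k => total + combB (N - k * (block_size - 1)) k) 0

def solve_alt (N : Int) (red : Int) (green : Int) (blue : Int) : Int :=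
  if N < 0 then 0  -- Source B raises ValueError for N < 0 (outside Pre_); 0 only makes the port total
  else tileB N red + tileB N green + tileB N blue

-- ===== PRECONDITION & SPEC =====
-- Pre_ admits exactly the inputs on which A returns: N ≥ 0, and for N ≥ 1 all tile sizes ≥ 0
-- (a negative N, or a negative tile size with N ≥ 1, makes A raise IndexError).
def Pre_solve (N : Int) (red : Int) (green : Int) (blue : Int) : Prop :=
  0 ≤ N ∧ (N = 0 ∨ (0 ≤ red ∧ 0 ≤ green ∧ 0 ≤ blue))
instance (N : Int) (red : Int) (green : Int) (blue : Int) : Decidable (Pre_solve N red green blue) := by unfold Pre_solve; infer_instance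

def pvWitness_solve : Int × Int × Int × Int := (7, 2, 3, 4)

-- On inputs with N ≥ 1 and a tile size equal to 0, A's in-place dp update double-counts and returns
-- 2^N - 1 ways for that color although no tile of length 0 can ever be placed; B returns 0 ways for
-- such a color, the intended count.
def D_solve (N : Int) (red : Int) (green : Int) (blue : Int) : Prop :=
  1 ≤ N ∧ (red = 0 ∨ green = 0 ∨ blue = 0)
instance (N : Int) (red : Int) (green : Int) (blue : Int) : Decidable (D_solve N red green blue) := by unfold D_solve; infer_instance

def Spec_solve (N : Int) (red : Int) (green : Int) (blue : Int) (out : Int) : Prop := ¬ D_solve N red green blue → out = solve_alt N red green blue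
instance (N : Int) (red : Int) (green : Int) (blue : Int) (out : Int) : Decidable (Spec_solve N red green blue out) := by unfold Spec_solve; infer_instance

def pvDiffWitness_solve : Int × Int × Int × Int := (1, 0, 1, 1)
def pvDiffWitnessOut_solve : Int × Int := (3, 2)

-- ===== CLAIM (what is proved, stated in full; the proofs are below) =====
def Claim_unchanged_solve : Prop := ∀ (N : Int) (red : Int) (green : Int) (blue : Int), Dom_solve N red green blue → Pre_solve N red green blue → Spec_solve N red green blue (solve N red green blue)
def Claim_changed_solve : Prop := Dom_solve (pvDiffWitness_solve.1) (pvDiffWitness_solve.2.1) (pvDiffWitness_solve.2.2.1) (pvDiffWitness_solve.2.2.2) ∧ Pre_solve (pvDiffWitness_solve.1) (pvDiffWitness_solve.2.1) (pvDiffWitness_solve.2.2.1) (pvDiffWitness_solve.2.2.2) ∧ D_solve (pvDiffWitness_solve.1) (pvDiffWitness_solve.2.1) (pvDiffWitness_solve.2.2.1) (pvDiffWitness_solve.2.2.2) ∧ solve (pvDiffWitness_solve.1) (pvDiffWitness_solve.2.1) (pvDiffWitness_solve.2.2.1) (pvDiffWitness_solve.2.2.2) = pvDiffWitnessOut_solve.1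 ∧ solve_alt (pvDiffWitness_solve.1) (pvDiffWitness_solve.2.1) (pvDiffWitness_solve.2.2.1) (pvDiffWitness_solve.2.2.2) = pvDiffWitnessOut_solve.2 ∧ pvDiffWitnessOut_solve.1 ≠ pvDiffWitnessOut_solve.2
def Claim_exact_solve : Prop := ∀ (N : Int) (red : Int) (green : Int) (blue : Int), Dom_solve N red green blue → Pre_solve N red green blue → D_solve N red green blue → solve N red green blue ≠ solve_alt N red green blue

-- ===== LEMMAS AND PROOFS =====

-- The dp recurrence of A as a Nat function (the guard 1 ≤ m is only for termination).
def fDP (m : Nat) : Nat → Nat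
  | 0 => 1
  | (n+1) => fDP m n + (if h : 1 ≤ m ∧ m ≤ n + 1 then fDP m (n + 1 - m) else 0)
decreasing_by all_goals omega

-- The binomial sum of B (including the all-gray k = 0 term, which contributes 1).
def gS (m n : Nat) : Nat := ∑ k ∈ Finset.range (n + 1), Nat.choose (n - k * (m - 1)) k

-- The dp list of A after processing prefix lengths 1..j.
def dpSt (m L j : Nat) : List Int :=
  (List.range L).map (fun i => if i ≤ j then (fDP m i : Int) else 0)

lemma choose_zero_of_big {m k n : Nat} (hm : 1 ≤ m) (hk : 1 ≤ k) (h : n < k * m) :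
    Nat.choose (n - k * (m - 1)) k = 0 := by
  apply Nat.choose_eq_zero_of_lt
  have : k * (m - 1) + k = k * m := by
    cases m with
    | zero => omega
    | succ m' => rw [Nat.succ_sub_one, Nat.mul_succ]
  omega

lemma gS_small {m t : Nat} (hm : 1 ≤ m) (h : t < m) : gS m t = 1 := by
  unfold gS
  rw [Finset.sum_range_succ']
  simp only [Nat.zero_mul, Nat.sub_zero, Nat.choose_zero_right]
  have : ∑ k ∈ Finset.range t, Nat.choose (t - (k + 1) * (m - 1)) (k + 1) = 0 := by
    apply Finset.sum_eq_zero
    intro k _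
    apply choose_zero_of_big hm (by omega)
    have : m ≤ (k + 1) * m := Nat.le_mul_of_pos_left m (by omega)
    omega
  omega

lemma gS_rec {m : Nat} (hm : 1 ≤ m) (n : Nat) :
    gS m (n + 1) = gS m n + (if m ≤ n + 1 then gS m (n + 1 - m) else 0) := by
  by_cases h : m ≤ n + 1
  · rw [if_pos h]
    have perterm : ∀ k ∈ Finset.range (n + 1),
        Nat.choose ((n + 1) - (k + 1) * (m - 1)) (k + 1)
          = Nat.choose (n - (k + 1) * (m - 1)) (k + 1)
            + Nat.choose ((n + 1 - m) - k * (m - 1)) k := by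
      intro k _
      have hx : (k + 1) * (m - 1) = k * (m - 1) + (m - 1) := by ring
      by_cases hkk : (k + 1) * (m - 1) ≤ n
      · have e1 : (n + 1) - (k + 1) * (m - 1) = (n - (k + 1) * (m - 1)) + 1 := by omega
        have e2 : (n + 1 - m) - k * (m - 1) = n - (k + 1) * (m - 1) := by omega
        rw [e1, e2]
        have h3 := Nat.choose_succ_succ (n - (k + 1) * (m - 1)) k
        simp only [Nat.succ_eq_add_one] at h3
        omega
      · have hk1 : 1 ≤ k := by
          rcases Nat.eq_zero_or_pos k with rfl | hk1
          · simp at hkk; omega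
          · exact hk1
        have e1 : (n + 1) - (k + 1) * (m - 1) = 0 := by omega
        have e2 : n - (k + 1) * (m - 1) = 0 := by omega
        have e3 : (n + 1 - m) - k * (m - 1) = 0 := by omega
        rw [e1, e2, e3, Nat.choose_eq_zero_of_lt (by omega : 0 < k + 1),
            Nat.choose_eq_zero_of_lt (by omega : 0 < k)]
    have lhs1 : gS m (n + 1)
        = (∑ k ∈ Finset.range (n + 1), Nat.choose ((n + 1) - (k + 1) * (m - 1)) (k + 1)) + 1 := by
      unfold gS
      rw [Finset.sum_range_succ']
      simp
    rw [lhs1, Finset.sum_congr rfl perterm, Finset.sum_add_distrib]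
    -- first sum = gS m n - 1
    have a1 : gS m n = (∑ k ∈ Finset.range n, Nat.choose (n - (k + 1) * (m - 1)) (k + 1)) + 1 := by
      unfold gS
      rw [Finset.sum_range_succ']
      simp
    have a2 : ∑ k ∈ Finset.range (n + 1), Nat.choose (n - (k + 1) * (m - 1)) (k + 1)
        = ∑ k ∈ Finset.range n, Nat.choose (n - (k + 1) * (m - 1)) (k + 1) := by
      have hz : Nat.choose (n - (n + 1) * (m - 1)) (n + 1) = 0 :=
        Nat.choose_eq_zero_of_lt (by omega)
      rw [Finset.sum_range_succ, hz, Nat.add_zero]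
    -- second sum = gS m (n + 1 - m)
    have b1 : ∑ k ∈ Finset.range (n + 1), Nat.choose ((n + 1 - m) - k * (m - 1)) k
        = gS m (n + 1 - m) := by
      unfold gS
      have hsub : Finset.range ((n + 1 - m) + 1) ⊆ Finset.range (n + 1) := by
        intro x hx
        simp only [Finset.mem_range] at hx ⊢
        omega
      refine (Finset.sum_subset hsub ?_).symm
      intro k hk hnk
      simp only [Finset.mem_range] at hk hnk
      have hk1 : 1 ≤ k := by omega
      refine choose_zero_of_big hm hk1 ?_
      have : k * 1 ≤ k * m := Nat.mul_le_mul_left k hm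
      omega
    rw [a2, b1]
    omega
  · rw [if_neg h, gS_small hm (by omega), gS_small hm (by omega)]

lemma map_range_set {α : Type} (L i : Nat) (fn : Nat → α) (v : α) :
    ((List.range L).map fn).set i v = (List.range L).map (fun x => if x = i then v else fn x) := by
  apply List.ext_getElem
  · simp
  · intro j h1 h2
    rw [List.getElem_set]
    rcases eq_or_ne i j with rfl | hne
    · simp
    · simp [hne, Ne.symm hne]

lemma map_range_getD {α : Type} (L i : Nat) (fn : Nat → α) (d : α) (h : i < L) :
    ((List.range L).map fn).getD i d = fn i := by
  rw [List.getD_eq_getElem?_getD]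
  simp [h]

lemma bodyA_step {m L : Nat} (hm : 1 ≤ m) (j : Nat) (hj : j + 1 < L) :
    bodyA (m : Int) (dpSt m L j) ((j + 1 : Nat) : Int) = dpSt m L (j + 1) := by
  unfold bodyA dpSt
  have hsub : ((j + 1 : Nat) : Int) - 1 = (j : Nat) := by push_cast; ring
  rw [hsub]
  rw [PySem.List.pyGetD_natCast, PySem.List.pyGetD_natCast, PySem.List.pySetD_natCast]
  rw [map_range_getD L (j+1) _ _ hj, map_range_getD L j _ _ (by omega)]
  rw [map_range_set]
  by_cases hbr : m ≤ j + 1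
  · rw [if_pos (by exact_mod_cast hbr : ((j + 1 : Nat) : Int) ≥ (m : Int))]
    have hsm : ((j + 1 : Nat) : Int) - (m : Int) = ((j + 1 - m : Nat) : Int) := by omega
    rw [hsm, PySem.List.pyGetD_natCast, PySem.List.pyGetD_natCast, PySem.List.pySetD_natCast]
    rw [map_range_getD L (j+1) _ _ hj, map_range_getD L (j+1-m) _ _ (by omega)]
    rw [map_range_set]
    refine List.map_congr_left ?_
    intro x _
    rcases eq_or_ne x (j+1) with rfl | hne
    · simp only [if_pos rfl, if_neg (show ¬ (j + 1 ≤ j) by omega),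
        if_neg (show j + 1 - m ≠ j + 1 by omega), if_pos (le_refl j),
        if_pos (show j + 1 - m ≤ j by omega), if_pos (le_refl (j+1)), zero_add]
      rw [fDP, dif_pos ⟨hm, hbr⟩]
      push_cast
      ring
    · simp only [hne, if_false]
      rcases Nat.lt_or_ge j x with hxx | hxx
      · rw [if_neg (by omega), if_neg (by omega)]
      · rw [if_pos hxx, if_pos (by omega)]
  · rw [if_neg (by exact_mod_cast hbr : ¬ ((j + 1 : Nat) : Int) ≥ (m : Int))]
    refine List.map_congr_left ?_
    intro x _
    rcases eq_or_ne x (j+1) with rfl | hne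
    · simp only [if_pos rfl, if_neg (show ¬ (j + 1 ≤ j) by omega),
        if_pos (le_refl j), if_pos (le_refl (j+1)), zero_add]
      rw [fDP, dif_neg (by omega)]
      push_cast
      ring
    · simp only [hne, if_false]
      rcases Nat.lt_or_ge j x with hxx | hxx
      · rw [if_neg (by omega), if_neg (by omega)]
      · rw [if_pos hxx, if_pos (by omega)]

lemma replicate_eq_map_range (L : Nat) : List.replicate L (0 : Int) = (List.range L).map (fun _ => 0) := by
  apply List.ext_getElem
  · simp
  · intro i h1 h2
    simp

lemma init_eq (m : Nat) (L : Nat) (hL : 0 < L) :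
    PySem.List.pySetD (List.replicate L (0 : Int)) 0 1 = dpSt m L 0 := by
  rw [replicate_eq_map_range]
  simp only [PySem.List.pySetD_of_nonneg, le_refl, Int.toNat_zero]
  rw [map_range_set]
  unfold dpSt
  refine List.map_congr_left ?_
  intro x _
  rcases eq_or_ne x 0 with rfl | hne
  · simp [fDP]
  · simp [hne, Nat.pos_of_ne_zero hne]

lemma loop_inv {m L : Nat} (hm : 1 ≤ m) : ∀ j, j < L →
    (PySem.List.pyRange 1 ((j : Nat) + 1 : Int) 1).foldl (bodyA (m : Int)) (dpSt m L 0) = dpSt m L j := by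
  intro j
  induction j with
  | zero =>
    intro _
    rw [PySem.List.pyRange_one_eq_nil (by simp)]
    rfl
  | succ j ih =>
    intro hj
    have hcast : ((j + 1 : Nat) : Int) + 1 = (((j : Nat) : Int) + 1) + 1 := by push_cast; ring
    rw [hcast, PySem.List.pyRange_one_succ_right (by omega), List.foldl_append]
    rw [ih (by omega)]
    have : ((j : Nat) : Int) + 1 = ((j + 1 : Nat) : Int) := by push_cast; ring
    rw [this]
    simp only [List.foldl_cons, List.foldl_nil]
    exact bodyA_step hm j hj

lemma tileA_eq {N m : Int} (hN : 0 ≤ N) (hm : 1 ≤ m) :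
    tileA N m = (fDP m.toNat N.toNat : Int) - 1 := by
  obtain ⟨n, rfl⟩ : ∃ x : Nat, N = (x : Int) := ⟨N.toNat, by omega⟩
  obtain ⟨m', rfl⟩ : ∃ x : Nat, m = (x : Int) := ⟨m.toNat, by omega⟩
  have hm' : 1 ≤ m' := by exact_mod_cast hm
  show PySem.List.pyGetD
      ((PySem.List.pyRange 1 ((n : Int) + 1) 1).foldl (bodyA (m' : Int))
        (PySem.List.pySetD (PySem.List.pyRepeat [0] ((n : Int) + 1)) 0 1)) (n : Int) 0 - 1
      = (fDP ((m' : Int)).toNat ((n : Int)).toNat : Int) - 1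
  have hrep : PySem.List.pyRepeat [(0 : Int)] ((n : Int) + 1) = List.replicate (n + 1) (0 : Int) := by
    rw [PySem.List.pyRepeat_singleton]
    have h1 : (((n : Int)) + 1).toNat = n + 1 := by omega
    rw [h1]
  rw [hrep]
  rw [init_eq m' (n + 1) (by omega)]
  rw [loop_inv hm' n (by omega)]
  rw [PySem.List.pyGetD_natCast]
  unfold dpSt
  rw [map_range_getD (n + 1) n _ _ (by omega)]
  simp

lemma combB_eq (n k : Nat) (hkn : k ≤ n) : combB (n : Int) (k : Int) = (Nat.choose n k : Int) := by
  induction k with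
  | zero =>
    simp [combB, PySem.List.pyRange_one_eq_nil]
  | succ j ih =>
    have hj : j ≤ n := by omega
    have hcast : ((j + 1 : Nat) : Int) = (j : Int) + 1 := by push_cast; ring
    unfold combB
    rw [hcast, PySem.List.pyRange_one_succ_right (by positivity), List.foldl_append]
    have hpre : (PySem.List.pyRange 0 (j : Int) 1).foldl
        (fun c i => PySem.Int.floordiv (c * ((n : Int) - i)) (i + 1)) 1 = (Nat.choose n j : Int) := ih hj
    rw [hpre]
    simp only [List.foldl_cons, List.foldl_nil]
    have hnj : ((n : Int) - (j : Int)) = ((n - j : Nat) : Int) := by omega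
    rw [hnj]
    have : (Nat.choose n j : Int) * ((n - j : Nat) : Int) = ((Nat.choose n j * (n - j) : Nat) : Int) := by
      push_cast; ring
    rw [this, ← hcast, PySem.Int.floordiv_natCast]
    congr 1
    rw [← Nat.choose_succ_right_eq]
    exact Nat.mul_div_cancel _ (by omega)

lemma sum_map_range_eq {β : Type} [AddCommMonoid β] (q : Nat) (f : Nat → β) :
    ((List.range q).map f).sum = ∑ k ∈ Finset.range q, f k := by
  induction q with
  | zero => simp
  | succ j ih => rw [List.range_succ, Finset.sum_range_succ, List.map_append, List.sum_append, ih]; simp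

lemma gS_tail {m n : Nat} (hm : 1 ≤ m) :
    gS m n = (∑ j ∈ Finset.range (n / m), Nat.choose (n - (j + 1) * (m - 1)) (j + 1)) + 1 := by
  unfold gS
  rw [Finset.sum_range_succ']
  simp only [Nat.zero_mul, Nat.sub_zero, Nat.choose_zero_right]
  congr 1
  have hsub : Finset.range (n / m) ⊆ Finset.range n := by
    intro x hx
    simp only [Finset.mem_range] at hx ⊢
    have := Nat.div_le_self n m
    omega
  refine (Finset.sum_subset hsub ?_).symm
  intro j hj hnj
  simp only [Finset.mem_range] at hj hnj
  apply choose_zero_of_big hm (by omega)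
  by_contra hle
  push_neg at hle
  have : j + 1 ≤ n / m := (Nat.le_div_iff_mul_le (by omega)).mpr hle
  omega

lemma tileB_eq {N m : Int} (hN : 0 ≤ N) (hm : 1 ≤ m) :
    tileB N m = (gS m.toNat N.toNat : Int) - 1 := by
  obtain ⟨n, rfl⟩ : ∃ x : Nat, N = (x : Int) := ⟨N.toNat, by omega⟩
  obtain ⟨m', rfl⟩ : ∃ x : Nat, m = (x : Int) := ⟨m.toNat, by omega⟩
  have hm' : 1 ≤ m' := by exact_mod_cast hm
  unfold tileB
  rw [if_neg (by omega)]
  rw [PySem.Int.floordiv_natCast, PySem.List.foldl_add, PySem.List.pyRange_one]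
  have hlen0 : (((n / m' : Nat) : Int) + 1 - 1) = ((n / m' : Nat) : Int) := by ring
  rw [hlen0, Int.toNat_natCast, List.map_map]
  have hterm : ∀ j ∈ List.range (n / m'),
      ((fun k => combB ((n : Int) - k * ((m' : Int) - 1)) k) ∘ fun k : Nat => 1 + (k : Int)) j
        = (fun i => ((Nat.choose (n - (i + 1) * (m' - 1)) (i + 1) : Nat) : Int)) j := by
    intro j hj
    simp only [List.mem_range] at hj
    have hdivle : j + 1 ≤ n / m' := by omega
    have hmul : (j + 1) * m' ≤ n := by
      calc (j + 1) * m' ≤ (n / m') * m' := Nat.mul_le_mul_right _ hdivle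
        _ ≤ n := Nat.div_mul_le_self n m'
    have hexp : (j + 1) * (m' - 1) + (j + 1) = (j + 1) * m' := by
      cases m' with
      | zero => omega
      | succ x => rw [Nat.succ_sub_one, Nat.mul_succ]
    simp only [Function.comp_apply]
    have hprod : (((j + 1) * (m' - 1) : Nat) : Int) = ((j + 1 : Nat) : Int) * (((m' - 1) : Nat) : Int) := by
      push_cast; ring
    have hc0 : (1 + (j : Int)) = ((j + 1 : Nat) : Int) := by push_cast; ring
    have hc1 : ((n : Int) - (1 + (j : Int)) * ((m' : Int) - 1))
        = ((n - (j + 1) * (m' - 1) : Nat) : Int) := by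
      rw [hc0]
      have h1 : ((m' - 1 : Nat) : Int) = (m' : Int) - 1 := by omega
      rw [← h1, ← hprod]
      omega
    rw [hc1, hc0, combB_eq _ _ (by omega)]
  rw [List.map_congr_left hterm, sum_map_range_eq]
  simp only [Int.toNat_natCast]
  rw [gS_tail hm']
  push_cast
  omega

lemma fDP_eq_gS {m : Nat} (hm : 1 ≤ m) : ∀ n, fDP m n = gS m n := by
  intro n
  induction n using Nat.strong_induction_on with
  | _ n ih =>
    cases n with
    | zero => simp [fDP, gS]
    | succ n' =>
      rw [fDP, gS_rec hm]
      rw [ih n' (by omega)]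
      by_cases h : m ≤ n' + 1
      · rw [dif_pos ⟨hm, h⟩, if_pos h, ih (n' + 1 - m) (by omega)]
      · rw [dif_neg (by omega), if_neg h]

lemma tileA_zero (m : Int) : tileA 0 m = 0 := by
  show PySem.List.pyGetD ((PySem.List.pyRange 1 ((0 : Int) + 1) 1).foldl (bodyA m)
      (PySem.List.pySetD (PySem.List.pyRepeat [0] ((0 : Int) + 1)) 0 1)) 0 0 - 1 = 0
  rw [show PySem.List.pyRange 1 ((0 : Int) + 1) 1 = [] from by decide]
  rw [show PySem.List.pySetD (PySem.List.pyRepeat [(0 : Int)] ((0 : Int) + 1)) 0 1 = [1] from by decide]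
  rw [List.foldl_nil]
  decide

lemma tileB_zero (m : Int) : tileB 0 m = 0 := by
  unfold tileB
  split_ifs with h
  · rfl
  · rw [show PySem.Int.floordiv 0 m = 0 from by simp [PySem.Int.floordiv]]
    rw [show PySem.List.pyRange 1 ((0 : Int) + 1) 1 = [] from by decide]
    rfl

lemma tile_eq {N m : Int} (hN : 0 ≤ N) (hm : 1 ≤ m) : tileA N m = tileB N m := by
  rw [tileA_eq hN hm, tileB_eq hN hm, fDP_eq_gS (by omega : 1 ≤ m.toNat)]

lemma tile_eq' {N m : Int} (hN : 0 ≤ N) (h : N = 0 ∨ 1 ≤ m) : tileA N m = tileB N m := by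
  rcases h with rfl | h
  · rw [tileA_zero, tileB_zero]
  · exact tile_eq hN h

-- ===== the m = 0 column: A's dp doubles in place and computes 2^N - 1 =====

def dpSt0 (L j : Nat) : List Int :=
  (List.range L).map (fun i => if i ≤ j then (2 ^ i : Int) else 0)

lemma bodyA_step0 {L : Nat} (j : Nat) (hj : j + 1 < L) :
    bodyA 0 (dpSt0 L j) ((j + 1 : Nat) : Int) = dpSt0 L (j + 1) := by
  unfold bodyA dpSt0
  have hsub : ((j + 1 : Nat) : Int) - 1 = (j : Nat) := by push_cast; ring
  rw [hsub]
  rw [PySem.List.pyGetD_natCast, PySem.List.pyGetD_natCast, PySem.List.pySetD_natCast]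
  rw [map_range_getD L (j+1) _ _ hj, map_range_getD L j _ _ (by omega)]
  rw [map_range_set]
  rw [if_pos (by positivity : ((j + 1 : Nat) : Int) ≥ 0)]
  have hsm : ((j + 1 : Nat) : Int) - 0 = ((j + 1 : Nat) : Int) := by ring
  rw [hsm, PySem.List.pyGetD_natCast, PySem.List.pySetD_natCast]
  rw [map_range_getD L (j+1) _ _ hj]
  rw [map_range_set]
  refine List.map_congr_left ?_
  intro x _
  rcases eq_or_ne x (j+1) with rfl | hne
  · simp only [if_pos rfl, if_neg (show ¬ (j + 1 ≤ j) by omega),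
      if_pos (le_refl j), if_pos (le_refl (j+1)), zero_add, if_true]
    rw [pow_succ]
    ring
  · simp only [hne, if_false]
    rcases Nat.lt_or_ge j x with hxx | hxx
    · rw [if_neg (by omega), if_neg (by omega)]
    · rw [if_pos hxx, if_pos (by omega)]

lemma loop_inv0 {L : Nat} : ∀ j, j < L →
    (PySem.List.pyRange 1 ((j : Nat) + 1 : Int) 1).foldl (bodyA 0) (dpSt0 L 0) = dpSt0 L j := by
  intro j
  induction j with
  | zero =>
    intro _
    rw [PySem.List.pyRange_one_eq_nil (by simp)]
    rfl
  | succ j ih =>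
    intro hj
    have hcast : ((j + 1 : Nat) : Int) + 1 = (((j : Nat) : Int) + 1) + 1 := by push_cast; ring
    rw [hcast, PySem.List.pyRange_one_succ_right (by omega), List.foldl_append]
    rw [ih (by omega)]
    have : ((j : Nat) : Int) + 1 = ((j + 1 : Nat) : Int) := by push_cast; ring
    rw [this]
    simp only [List.foldl_cons, List.foldl_nil]
    exact bodyA_step0 j hj

lemma init_eq0 (L : Nat) (hL : 0 < L) :
    PySem.List.pySetD (List.replicate L (0 : Int)) 0 1 = dpSt0 L 0 := by
  rw [replicate_eq_map_range]
  simp only [PySem.List.pySetD_of_nonneg, le_refl, Int.toNat_zero]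
  rw [map_range_set]
  unfold dpSt0
  refine List.map_congr_left ?_
  intro x _
  rcases eq_or_ne x 0 with rfl | hne
  · simp
  · simp [hne]

lemma tileA_m0 {N : Int} (hN : 0 ≤ N) : tileA N 0 = 2 ^ N.toNat - 1 := by
  obtain ⟨n, rfl⟩ : ∃ x : Nat, N = (x : Int) := ⟨N.toNat, by omega⟩
  show PySem.List.pyGetD
      ((PySem.List.pyRange 1 ((n : Int) + 1) 1).foldl (bodyA 0)
        (PySem.List.pySetD (PySem.List.pyRepeat [0] ((n : Int) + 1)) 0 1)) (n : Int) 0 - 1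
      = 2 ^ ((n : Int)).toNat - 1
  have hrep : PySem.List.pyRepeat [(0 : Int)] ((n : Int) + 1) = List.replicate (n + 1) (0 : Int) := by
    rw [PySem.List.pyRepeat_singleton]
    have h1 : (((n : Int)) + 1).toNat = n + 1 := by omega
    rw [h1]
  rw [hrep]
  rw [init_eq0 (n + 1) (by omega)]
  rw [loop_inv0 n (by omega)]
  rw [PySem.List.pyGetD_natCast]
  unfold dpSt0
  rw [map_range_getD (n + 1) n _ _ (by omega)]
  simp

lemma tileB_m0 (N : Int) : tileB N 0 = 0 := by
  unfold tileB
  rw [if_pos (by omega)]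

-- ===== VERDICT (by name: the statement is the Claim_ definition above) =====
theorem solve_spec : Claim_unchanged_solve := by
  intro N red green blue _ hpre hnd
  obtain ⟨hN, hor⟩ := hpre
  unfold D_solve at hnd
  show solve N red green blue = solve_alt N red green blue
  unfold solve solve_alt
  rw [if_neg (by omega)]
  rcases hor with rfl | ⟨hr, hg, hb⟩
  · rw [tile_eq' le_rfl (Or.inl rfl), tile_eq' le_rfl (Or.inl rfl), tile_eq' le_rfl (Or.inl rfl)]
  · rcases eq_or_ne N 0 with rfl | hN1
    · rw [tile_eq' le_rfl (Or.inl rfl), tile_eq' le_rfl (Or.inl rfl), tile_eq' le_rfl (Or.inl rfl)]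
    · have hD : ¬ (red = 0 ∨ green = 0 ∨ blue = 0) := fun h => hnd ⟨by omega, h⟩
      rw [tile_eq' hN (Or.inr (by omega)), tile_eq' hN (Or.inr (by omega)),
          tile_eq' hN (Or.inr (by omega))]

theorem solve_changed : Claim_changed_solve := by
  unfold Claim_changed_solve
  decide

theorem solve_tight : Claim_exact_solve := by
  intro N red green blue _ hpre hd
  obtain ⟨hN, hor⟩ := hpre
  obtain ⟨hN1, hzero⟩ := hd
  have hall : 0 ≤ red ∧ 0 ≤ green ∧ 0 ≤ blue := by
    rcases hor with rfl | h
    · omega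
    · exact h
  obtain ⟨hr, hg, hb⟩ := hall
  unfold solve solve_alt
  rw [if_neg (by omega)]
  have hpow : (1 : Int) ≤ 2 ^ N.toNat - 1 := by
    have h2 : (2 : Int) ^ 1 ≤ 2 ^ N.toNat := by
      apply pow_le_pow_right₀ (by omega)
      omega
    simp at h2
    omega
  have key : ∀ m : Int, 0 ≤ m →
      (m = 0 → tileA N m = 2 ^ N.toNat - 1 ∧ tileB N m = 0) ∧
      (1 ≤ m → tileA N m = tileB N m) := by
    intro m hm0
    constructor
    · rintro rfl
      exact ⟨tileA_m0 hN, tileB_m0 N⟩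
    · intro h1
      exact tile_eq hN h1
  have kr := key red hr
  have kg := key green hg
  have kb := key blue hb
  rcases hzero with h0 | h0 | h0
  · have h1 := (kr.1 h0)
    rcases eq_or_ne green 0 with hg0 | hg0 <;> rcases eq_or_ne blue 0 with hb0 | hb0
    · have h2 := kg.1 hg0; have h3 := kb.1 hb0; omega
    · have h2 := kg.1 hg0; have h3 := kb.2 (by omega); omega
    · have h2 := kg.2 (by omega); have h3 := kb.1 hb0; omega
    · have h2 := kg.2 (by omega); have h3 := kb.2 (by omega); omega
  · have h2 := kg.1 h0
    rcases eq_or_ne red 0 with hr0 | hr0 <;> rcases eq_or_ne blue 0 with hb0 | hb0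
    · have h1 := kr.1 hr0; have h3 := kb.1 hb0; omega
    · have h1 := kr.1 hr0; have h3 := kb.2 (by omega); omega
    · have h1 := kr.2 (by omega); have h3 := kb.1 hb0; omega
    · have h1 := kr.2 (by omega); have h3 := kb.2 (by omega); omega
  · have h3 := kb.1 h0
    rcases eq_or_ne red 0 with hr0 | hr0 <;> rcases eq_or_ne green 0 with hg0 | hg0
    · have h1 := kr.1 hr0; have h2 := kg.1 hg0; omega
    · have h1 := kr.1 hr0; have h2 := kg.2 (by omega); omega
    · have h1 := kr.2 (by omega); have h2 := kg.1 hg0; omega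
    · have h1 := kr.2 (by omega); have h2 := kg.2 (by omega); omega
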